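-- pv_equiv track=rewrite | github.com/pypi-data/pypi-mirror-334 | packages/kyzylborda-lib/kyzylborda_lib-1.0.12.tar.gz/kyzylborda_lib-1.0.12/kyzylborda_lib/secrets/encoding.py | decode_numbers
-- ===== SOURCE A (Python) =====
-- import string
--
-- SAFE_CHARACTERS = "".join(sorted(string.ascii_lowercase + string.digits))
--
-- THRESHOLD = 6  # choosen by fair dice roll
--
-- def decode_numbers(s: str) -> list[int]:
--     nums = []
--     cur_coeff = 0
--
--     for c in s:
--         value = SAFE_CHARACTERS.index(c)
--         if value < THRESHOLD:
--             nums.append(value)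
--             cur_coeff = THRESHOLD
--         else:
--             nums[-1] += (value - THRESHOLD) * cur_coeff
--             cur_coeff *= len(SAFE_CHARACTERS) - THRESHOLD
--
--     return nums
-- ===== SOURCE B (Python) =====
-- import string
--
-- SAFE_CHARACTERS = "".join(sorted(string.ascii_lowercase + string.digits))
--
-- THRESHOLD = 6
--
-- def decode_numbers(s: str) -> list[int]:
--     # pass 1: split the digit stream into groups, one per encoded number
--     groups = []
--     for c in s:
--         value = SAFE_CHARACTERS.index(c)
--         if value < THRESHOLD:
--             groups.append([value])
--         else:
--             groups[-1].append(value)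
--     # pass 2: evaluate each group positionally (reverse Horner)
--     base = len(SAFE_CHARACTERS) - THRESHOLD
--     result = []
--     for g in groups:
--         acc = 0
--         for h in reversed(g[1:]):
--             acc = acc * base + (h - THRESHOLD)
--         result.append(g[0] + THRESHOLD * acc)
--     return result
-- ===== Notes on version B (the rewrite author's own statement) =====
-- stated objective: alternative
-- what changed: A's single loop with a running coefficient and in-place last-element updates is replaced by two passes: first split the digit stream into groups, then evaluate each group positionally by reverse Horner.
-- outside the precondition, e.g. on decode_numbers('z'): A raises IndexError, B raises IndexError; on decode_numbers('3!'): A raises ValueError, B raises ValueError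
import Mathlib
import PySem

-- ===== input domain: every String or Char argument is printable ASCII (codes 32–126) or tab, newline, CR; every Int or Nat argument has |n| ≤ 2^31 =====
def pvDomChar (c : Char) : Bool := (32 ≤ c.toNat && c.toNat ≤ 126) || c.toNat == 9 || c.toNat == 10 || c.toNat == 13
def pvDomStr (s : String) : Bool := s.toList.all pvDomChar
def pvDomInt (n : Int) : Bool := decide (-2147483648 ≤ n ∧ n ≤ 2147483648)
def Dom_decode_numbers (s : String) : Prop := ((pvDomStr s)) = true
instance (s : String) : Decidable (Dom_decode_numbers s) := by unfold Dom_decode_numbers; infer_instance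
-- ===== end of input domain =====

-- B replaces A's running-coefficient single loop by two passes (group the digits, then
-- evaluate each group by reverse Horner): a different decomposition, same cost (objective: alternative).


-- SAFE_CHARACTERS = sorted(ascii_lowercase + digits) = digits then lowercase letters
def pvSafe : List Char := "0123456789abcdefghijklmnopqrstuvwxyz".toList

-- ===== PORT A =====
-- one loop step of A: value = SAFE_CHARACTERS.index(c); branch on value < THRESHOLD
-- (index? = none is Python's ValueError, getLast? = none is the IndexError of nums[-1];
-- both are excluded by Pre_, the port leaves the state unchanged there)
def pvStepA (st : List Int × Int) (c : Char) : List Int × Int :=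
  match PySem.List.index? pvSafe c with
  | none => st
  | some v =>
    if (v : Int) < 6 then (st.1 ++ [(v : Int)], 6)
    else
      match st.1.getLast? with
      | none => st
      | some last => (st.1.dropLast ++ [last + ((v : Int) - 6) * st.2],
                      st.2 * ((pvSafe.length : Int) - 6))

def decode_numbers (s : String) : List Int :=
  (s.toList.foldl pvStepA ([], 0)).1

-- ===== PORT B =====
-- pass 1 of B: split the digit stream into groups (groups[-1].append on no group = IndexError,
-- excluded by Pre_; the port leaves the groups unchanged there)
def pvStepGroups (gs : List (List Int)) (c : Char) : List (List Int) :=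
  match PySem.List.index? pvSafe c with
  | none => gs
  | some v =>
    if (v : Int) < 6 then gs ++ [[(v : Int)]]
    else
      match gs.getLast? with
      | none => gs
      | some g => gs.dropLast ++ [g ++ [(v : Int)]]

-- pass 2 of B: reverse Horner over the tail of a group
def pvDecodeGroup (g : List Int) : Int :=
  match g with
  | [] => 0
  | b :: rest => b + 6 * (rest.reverse.foldl (fun acc h => acc * 30 + (h - 6)) 0)

def decode_numbers_alt (s : String) : List Int :=
  (s.toList.foldl pvStepGroups []).map pvDecodeGroup

-- ===== PRECONDITION & SPEC =====
-- Pre_ excludes exactly the inputs on which A raises: a character outside SAFE_CHARACTERS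
-- (ValueError) or a first character with value ≥ THRESHOLD (IndexError on nums[-1]).
def Pre_decode_numbers (s : String) : Prop :=
  (s.toList.all (fun c => pvSafe.contains c)
    && s.toList.head?.all (fun c => (['0','1','2','3','4','5'] : List Char).contains c)) = true
instance (s : String) : Decidable (Pre_decode_numbers s) := by
  unfold Pre_decode_numbers; infer_instance

def pvWitness_decode_numbers : String := "3ab04z1"

def Spec_decode_numbers (s : String) (out : List Int) : Prop := out = decode_numbers_alt s
instance (s : String) (out : List Int) : Decidable (Spec_decode_numbers s out) := by unfold Spec_decode_numbers; infer_instance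

-- ===== CLAIM (what is proved, stated in full; the proofs are below) =====
def Claim_equal_decode_numbers : Prop := ∀ (s : String), Dom_decode_numbers s → Pre_decode_numbers s → Spec_decode_numbers s (decode_numbers s)

-- ===== LEMMAS AND PROOFS =====

-- shifting the accumulator of the Horner fold
theorem pvHorner_shift (l : List Int) (a : Int) :
    l.foldl (fun acc h => acc * 30 + (h - 6)) a
      = l.foldl (fun acc h => acc * 30 + (h - 6)) 0 + a * 30 ^ l.length := by
  induction l generalizing a with
  | nil => simp
  | cons x xs ih =>
    simp only [List.foldl_cons, List.length_cons]
    rw [ih (a * 30 + (x - 6)), ih (0 * 30 + (x - 6))]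
    ring

-- appending one high digit to a (nonempty) group adds (v-6)·6·30^(len-1) to its value
theorem pvDecodeGroup_concat (b : Int) (rest : List Int) (v : Int) :
    pvDecodeGroup ((b :: rest) ++ [v])
      = pvDecodeGroup (b :: rest) + (v - 6) * (6 * 30 ^ rest.length) := by
  simp only [pvDecodeGroup, List.cons_append, List.reverse_append, List.reverse_cons,
    List.reverse_nil, List.nil_append, List.foldl_cons]
  rw [pvHorner_shift rest.reverse (0 * 30 + (v - 6))]
  simp only [List.length_reverse]
  ring

-- the coefficient A carries, reconstructed from B's groups
def pvCoeff (gs : List (List Int)) : Int :=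
  match gs.getLast? with
  | none => 0
  | some g => 6 * 30 ^ (g.length - 1)

theorem pvSafe_len : ((pvSafe.length : Int) - 6) = 30 := by decide

-- main invariant: A's fold state is B's groups, decoded, plus the matching coefficient
theorem pvInvariant (l : List Char) (st : List Int × Int) (gs : List (List Int))
    (h1 : st.1 = gs.map pvDecodeGroup) (h2 : st.2 = pvCoeff gs)
    (h3 : ∀ g ∈ gs, g ≠ []) :
    (l.foldl pvStepA st).1 = (l.foldl pvStepGroups gs).map pvDecodeGroup := by
  induction l generalizing st gs with
  | nil => simpa using h1
  | cons c cs ih =>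
    simp only [List.foldl_cons]
    cases hidx : PySem.List.index? pvSafe c with
    | none =>
      simp only [pvStepA, pvStepGroups, hidx]
      exact ih st gs h1 h2 h3
    | some v =>
      simp only [pvStepA, pvStepGroups, hidx]
      by_cases hv : (v : Int) < 6
      · simp only [if_pos hv]
        refine ih _ _ ?_ ?_ ?_
        · simp [h1, pvDecodeGroup]
        · simp [pvCoeff]
        · intro g hg
          rcases List.mem_append.1 hg with h | h
          · exact h3 g h
          · simp at h; simp [h]
      · simp only [if_neg hv]
        rcases List.eq_nil_or_concat gs with rfl | ⟨gs', g, rfl⟩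
        · have : st.1 = [] := by simpa using h1
          simp only [this, List.getLast?_nil]
          exact ih st [] h1 h2 h3
        · simp only [List.concat_eq_append] at h1 h2 h3 ⊢
          have hg : g ≠ [] := h3 g (by simp)
          obtain ⟨b, rest, rfl⟩ : ∃ b rest, g = b :: rest := by
            cases g with
            | nil => exact absurd rfl hg
            | cons b rest => exact ⟨b, rest, rfl⟩
          have hst1 : st.1 = gs'.map pvDecodeGroup ++ [pvDecodeGroup (b :: rest)] := by
            simpa using h1
          have hstlast : st.1.getLast? = some (pvDecodeGroup (b :: rest)) := by
            rw [hst1]; simp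
          have hgslast : (gs' ++ [b :: rest]).getLast? = some (b :: rest) := by simp
          have hcoeff : st.2 = 6 * 30 ^ rest.length := by
            rw [h2]; simp [pvCoeff]
          rw [hstlast, hgslast]
          refine ih _ _ ?_ ?_ ?_
          · simp only [hst1, List.dropLast_concat, List.map_append, List.map_cons,
              List.map_nil, List.cons_append]
            rw [hcoeff]
            simp only [← List.cons_append]
            rw [pvDecodeGroup_concat]
          · simp only [pvCoeff, List.dropLast_concat, List.getLast?_concat, hcoeff,
              pvSafe_len, List.length_append, List.length_cons, List.length_nil]
            have hlen : rest.length + 1 + 1 - 1 = rest.length + 1 := by omega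
            rw [hlen, pow_succ]
            ring
          · intro g hgm
            rcases List.mem_append.1 hgm with h | h
            · exact h3 g (List.dropLast_subset _ h)
            · simp at h; simp [h]

-- ===== VERDICT (by name: the statement is the Claim_ definition above) =====
theorem decode_numbers_spec : Claim_equal_decode_numbers := by
  intro s _ _
  unfold Spec_decode_numbers decode_numbers decode_numbers_alt
  exact pvInvariant s.toList ([], 0) [] rfl rfl (by simp)
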